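-- pv_equiv track=rewrite | github.com/Yuriltlef/StratOS | scripts/update_comment.py | match_line
-- ===== SOURCE A (Python) =====
-- def match_line(line, s_sym, e_sym, stack):
--     """Process stack operations for a single line"""
--     i = 0
--     line_len = len(line)
--
--     while i < line_len:
--         if s_sym == e_sym:
--             # For cases where start and end symbols are the same (like Python triple quotes)
--             if i + len(s_sym) <= line_len and line[i:i+len(s_sym)] == s_sym:
--                 if not stack:  # Stack is empty, push
--                     stack.append(s_sym)
--                     i += len(s_sym)
--                 else:  # Stack is not empty, pop
--                     stack.pop()
--                     i += len(s_sym)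
--             else:
--                 i += 1
--         else:
--             # For cases where start and end symbols are different (like C /* and */)
--             if i + len(s_sym) <= line_len and line[i:i+len(s_sym)] == s_sym:
--                 stack.append(s_sym)
--                 i += len(s_sym)
--             elif i + len(e_sym) <= line_len and line[i:i+len(e_sym)] == e_sym:
--                 if not stack:
--                     raise Exception("Unexpected end symbol")
--                 stack.pop()
--                 i += len(e_sym)
--             else:
--                 i += 1
--
--     return stack
-- ===== SOURCE B (Python) =====
-- def match_line(line, s_sym, e_sym, stack):
--     """Jump-based rescan: hop between occurrences with str.find instead of stepping the
--     index one char at a time.  Like the original, mutates `stack` in place and returns it;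
--     raises the same Exception on a stray end symbol."""
--     i = 0
--     if s_sym == e_sym:
--         while s_sym:
--             p = line.find(s_sym, i)
--             if p == -1:
--                 break
--             if stack:
--                 stack.pop()
--             else:
--                 stack.append(s_sym)
--             i = p + len(s_sym)
--         return stack
--     while s_sym and e_sym:
--         ps = line.find(s_sym, i)
--         pe = line.find(e_sym, i)
--         if ps == -1 and pe == -1:
--             break
--         if pe == -1 or (ps != -1 and ps <= pe):
--             stack.append(s_sym)
--             i = ps + len(s_sym)
--         else:
--             if not stack:
--                 raise Exception("Unexpected end symbol")
--             stack.pop()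
--             i = pe + len(e_sym)
--     return stack
-- ===== Notes on version B (the rewrite author's own statement) =====
-- stated objective: faster
-- what changed: Replaces A's per-index while loop (slice-compare at every position) with a jump-based scan that uses str.find to hop directly from one symbol occurrence to the next, preferring the start symbol on ties exactly as A's branch order does.
-- outside the precondition, e.g. on match_line('aaa', 'a', '', []): A returns ['a', 'a', 'a'], B returns []; on match_line('ab', '', 'b', []): A does not finish within the time limit, B returns []
import Mathlib
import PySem

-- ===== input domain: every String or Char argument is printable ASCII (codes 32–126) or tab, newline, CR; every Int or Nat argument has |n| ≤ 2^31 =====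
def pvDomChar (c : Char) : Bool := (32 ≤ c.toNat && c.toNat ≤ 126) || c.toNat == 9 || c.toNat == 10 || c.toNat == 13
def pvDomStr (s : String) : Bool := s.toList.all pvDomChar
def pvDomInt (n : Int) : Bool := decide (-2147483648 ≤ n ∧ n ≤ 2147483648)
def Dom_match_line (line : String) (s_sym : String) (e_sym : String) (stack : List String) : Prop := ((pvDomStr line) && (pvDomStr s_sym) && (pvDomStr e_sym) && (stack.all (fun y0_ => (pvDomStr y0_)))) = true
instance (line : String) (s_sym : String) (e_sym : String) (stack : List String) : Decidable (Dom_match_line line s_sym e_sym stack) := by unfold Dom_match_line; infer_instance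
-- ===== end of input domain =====

-- B replaces A's per-index scan by a jump-based scan via str.find (faster by a constant
-- factor in Python, as measured); both Pythons mutate `stack` in place and return it —
-- the theorems here are about the RETURN value.

-- ===== PORT A =====
-- A's while loop, as structural recursion with fuel (one fuel per iteration; line.length + 1
-- fuel suffices for every input inside Pre_, since each iteration then advances i by ≥ 1).
-- Python's slice test `line[i:i+len(s_sym)] == s_sym` is ported literally as
-- `i + s.length ≤ line.length ∧ (line.drop i).take s.length = s` (a slice is drop-then-take).
def matchLoopA (line s e : List Char) (ssym : String) (fuel : Nat) (i : Nat) (stack : List String) : List String :=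
  match fuel with
  | 0 => stack   -- fuel exhaustion: only reachable where the Python loops forever (outside Pre_)
  | fuel' + 1 =>
    if i < line.length then
      if s = e then
        if i + s.length ≤ line.length ∧ (line.drop i).take s.length = s then
          if stack = [] then matchLoopA line s e ssym fuel' (i + s.length) (stack ++ [ssym])
          else matchLoopA line s e ssym fuel' (i + s.length) stack.dropLast
        else matchLoopA line s e ssym fuel' (i + 1) stack
      else
        if i + s.length ≤ line.length ∧ (line.drop i).take s.length = s then
          matchLoopA line s e ssym fuel' (i + s.length) (stack ++ [ssym])
        else if i + e.length ≤ line.length ∧ (line.drop i).take e.length = e then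
          if stack = [] then stack   -- Python: raise Exception("Unexpected end symbol") — outside Pre_
          else matchLoopA line s e ssym fuel' (i + e.length) stack.dropLast
        else matchLoopA line s e ssym fuel' (i + 1) stack
    else stack

def match_line (line : String) (s_sym : String) (e_sym : String) (stack : List String) : List String :=
  matchLoopA line.toList s_sym.toList e_sym.toList s_sym (line.toList.length + 1) 0 stack

-- ===== PORT B =====
-- Source B's two while loops, with fuel for the same reason as A's port.  Python's
-- line.find(sub, i) is PySem.Chars.findFrom (result -1 = not found, as in Python).
-- Same-symbol loop of Source B (`while s_sym: p = line.find(s_sym, i); …`):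
def matchLoopBSame (line s : List Char) (ssym : String) (fuel : Nat) (i : Nat) (stack : List String) : List String :=
  match fuel with
  | 0 => stack
  | fuel' + 1 =>
    if s = [] then stack
    else
      let p := PySem.Chars.findFrom line s (i : Int)
      if p = -1 then stack
      else if stack = [] then matchLoopBSame line s ssym fuel' (p.toNat + s.length) (stack ++ [ssym])
      else matchLoopBSame line s ssym fuel' (p.toNat + s.length) stack.dropLast

-- Distinct-symbol loop of Source B (`while s_sym and e_sym: ps = …; pe = …; …`):
def matchLoopBDiff (line s e : List Char) (ssym : String) (fuel : Nat) (i : Nat) (stack : List String) : List String :=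
  match fuel with
  | 0 => stack
  | fuel' + 1 =>
    if s = [] ∨ e = [] then stack
    else
      let ps := PySem.Chars.findFrom line s (i : Int)
      let pe := PySem.Chars.findFrom line e (i : Int)
      if ps = -1 ∧ pe = -1 then stack
      else if pe = -1 ∨ (ps ≠ -1 ∧ ps ≤ pe) then
        matchLoopBDiff line s e ssym fuel' (ps.toNat + s.length) (stack ++ [ssym])
      else if stack = [] then stack   -- Python: raise Exception("Unexpected end symbol") — outside Pre_
      else matchLoopBDiff line s e ssym fuel' (pe.toNat + e.length) stack.dropLast

def match_line_alt (line : String) (s_sym : String) (e_sym : String) (stack : List String) : List String :=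
  if s_sym = e_sym then matchLoopBSame line.toList s_sym.toList s_sym (line.toList.length + 1) 0 stack
  else matchLoopBDiff line.toList s_sym.toList e_sym.toList s_sym (line.toList.length + 1) 0 stack

-- ===== PRECONDITION & SPEC =====
-- Whether A raises "Unexpected end symbol" is inherently a property of the whole scan of
-- `line`; scanOk states it as a pure depth count (no stack contents, no output) over the input.
-- scanOk s e cur depth = "scanning cur as A does never pops at depth 0": a property of the
-- input line (depth counts, no stack contents, no output is computed).
def scanOk (s e : List Char) (cur : List Char) (depth : Nat) : Bool :=
  match cur with
  | [] => true
  | c :: rest =>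
    if h1 : s ≠ [] ∧ s <+: (c :: rest) then scanOk s e ((c :: rest).drop s.length) (depth + 1)
    else if h2 : e ≠ [] ∧ e <+: (c :: rest) then
      if depth = 0 then false else scanOk s e ((c :: rest).drop e.length) (depth - 1)
    else scanOk s e rest depth
termination_by cur.length
decreasing_by
  · have : 0 < s.length := List.length_pos_iff.mpr h1.1
    simp [List.length_drop]; omega
  · have : 0 < e.length := List.length_pos_iff.mpr h2.1
    simp [List.length_drop]; omega
  · simp

-- Pre_ excludes empty symbols on a nonempty line (A loops forever, raises, or — when s_sym
-- matches everywhere — accidentally returns) and lines whose stray end symbol underflows the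
-- stack (A raises Exception("Unexpected end symbol"); Source B raises the same exception there).
def Pre_match_line (line : String) (s_sym : String) (e_sym : String) (stack : List String) : Prop :=
  line = "" ∨ (s_sym ≠ "" ∧ e_sym ≠ "" ∧
    (s_sym = e_sym ∨ scanOk s_sym.toList e_sym.toList line.toList stack.length = true))
instance (line : String) (s_sym : String) (e_sym : String) (stack : List String) : Decidable (Pre_match_line line s_sym e_sym stack) := by unfold Pre_match_line; infer_instance

def pvWitness_match_line : String × String × String × List String := ("", "/*", "*/", [])

def Spec_match_line (line : String) (s_sym : String) (e_sym : String) (stack : List String) (out : List String) : Prop := out = match_line_alt line s_sym e_sym stack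
instance (line : String) (s_sym : String) (e_sym : String) (stack : List String) (out : List String) : Decidable (Spec_match_line line s_sym e_sym stack out) := by unfold Spec_match_line; infer_instance

-- ===== CLAIM (what is proved, stated in full; the proofs are below) =====
def Claim_equal_match_line : Prop := ∀ (line : String) (s_sym : String) (e_sym : String) (stack : List String), Dom_match_line line s_sym e_sym stack → Pre_match_line line s_sym e_sym stack → Spec_match_line line s_sym e_sym stack (match_line line s_sym e_sym stack)

-- ===== LEMMAS AND PROOFS =====

-- Python's slice test is the prefix test (for a nonempty pattern the length guard is implied).
theorem condA_iff (line s : List Char) (i : Nat) (hs : s ≠ []) :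
    (i + s.length ≤ line.length ∧ (line.drop i).take s.length = s) ↔ s <+: line.drop i := by
  rw [List.prefix_iff_eq_take]
  constructor
  · rintro ⟨h1, h2⟩; exact h2.symm
  · intro h
    have hl : s.length ≤ (line.drop i).length := by rw [h]; simp
    have hp : 0 < s.length := List.length_pos_iff.mpr hs
    simp only [List.length_drop] at hl
    exact ⟨by omega, h.symm⟩

-- find from a match position returns that position.
theorem findFrom_at_match (line sub : List Char) (k : Nat) (hsub : sub ≠ [])
    (h : sub <+: line.drop k) : PySem.Chars.findFrom line sub (k : Int) = (k : Int) := by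
  have hp : 0 < sub.length := List.length_pos_iff.mpr hsub
  have hl : sub.length ≤ (line.drop k).length := h.length_le
  simp only [List.length_drop] at hl
  have hk : k ≤ line.length := by omega
  rw [PySem.Chars.findFrom_natCast line sub k hk]
  have hinf : sub <:+: line.drop k := h.isInfix
  have h0 : 0 ≤ PySem.Chars.find (line.drop k) sub := (PySem.Chars.find_nonneg_iff _ _).mpr hinf
  obtain ⟨hpre, hmin⟩ := PySem.Chars.find_spec h0
  have hz : (PySem.Chars.find (line.drop k) sub).toNat = 0 := by
    by_contra hnz
    exact hmin 0 (by omega) (by simpa using h)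
  have hfz : PySem.Chars.find (line.drop k) sub = 0 := by omega
  rw [hfz]; simp

-- find from the end position of a nonempty pattern fails.
theorem findFrom_at_end (line sub : List Char) (hsub : sub ≠ []) :
    PySem.Chars.findFrom line sub (line.length : Int) = -1 := by
  rw [PySem.Chars.findFrom_natCast_eq_neg_one_iff line sub line.length (le_refl _)]
  simp [List.drop_length]
  exact hsub

theorem infix_cons_of_no_prefix (c : Char) (t sub : List Char) (h : ¬ sub <+: c :: t) :
    sub <:+: (c :: t) ↔ sub <:+: t := by
  constructor
  · intro hi
    rcases (PySem.Chars.exists_prefix_drop_iff_isIn sub (c :: t)).mpr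
      ((PySem.Chars.isIn_iff_infix sub (c :: t)).mpr hi) with ⟨j, hj⟩
    cases j with
    | zero => simp at hj; exact absurd hj h
    | succ j' =>
      exact (PySem.Chars.isIn_iff_infix sub t).mp
        ((PySem.Chars.exists_prefix_drop_iff_isIn sub t).mp ⟨j', by simpa using hj⟩)
  · intro hi; exact hi.trans (List.suffix_cons c t).isInfix

theorem find_cons_no_match (c : Char) (t sub : List Char) (h : ¬ sub <+: c :: t) :
    PySem.Chars.find (c :: t) sub =
      if PySem.Chars.find t sub = -1 then -1 else 1 + PySem.Chars.find t sub := by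
  have hinf := infix_cons_of_no_prefix c t sub h
  split
  · next hft =>
    rw [PySem.Chars.find_eq_neg_one_iff] at hft ⊢
    exact fun hi => hft (hinf.mp hi)
  · next hft =>
    have hft0 : 0 ≤ PySem.Chars.find t sub := by
      have := PySem.Chars.neg_one_le_find t sub; omega
    have hf0 : 0 ≤ PySem.Chars.find (c :: t) sub := by
      rw [PySem.Chars.find_nonneg_iff]
      exact hinf.mpr ((PySem.Chars.find_nonneg_iff t sub).mp hft0)
    obtain ⟨hpt, hmt⟩ := PySem.Chars.find_spec hft0
    obtain ⟨hpc, hmc⟩ := PySem.Chars.find_spec hf0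
    set ft := (PySem.Chars.find t sub).toNat with hftdef
    set f := (PySem.Chars.find (c :: t) sub).toNat with hfdef
    have hfne : f ≠ 0 := by
      intro h0; rw [h0] at hpc; simp at hpc; exact h hpc
    have h1 : ft ≤ f - 1 := by
      by_contra hlt
      exact hmt (f - 1) (by omega) (by
        have hdd : List.drop (f - 1) t = List.drop f (c :: t) := by
          have hf1 : f - 1 + 1 = f := by omega
          rw [← hf1, List.drop_succ_cons]; simp
        rw [hdd]; exact hpc)
    have h2 : f ≤ ft + 1 := by
      by_contra hlt
      exact hmc (ft + 1) (by omega) (by simpa using hpt)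
    omega

-- stepping over a non-match position does not change the find result.
theorem findFrom_step (line sub : List Char) (k : Nat) (hk : k < line.length)
    (h : ¬ sub <+: line.drop k) :
    PySem.Chars.findFrom line sub (k : Int) = PySem.Chars.findFrom line sub ((k + 1 : Nat) : Int) := by
  rw [PySem.Chars.findFrom_natCast line sub k (by omega),
      PySem.Chars.findFrom_natCast line sub (k + 1) (by omega)]
  obtain ⟨c, t, hct⟩ : ∃ c t, line.drop k = c :: t := by
    cases hd : line.drop k with
    | nil => exfalso; have h2 := List.length_drop (l := line) (i := k); rw [hd] at h2; simp at h2; omega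
    | cons c t => exact ⟨c, t, rfl⟩
  have ht : line.drop (k + 1) = t := by
    have h3 : (line.drop k).tail = line.drop (k + 1) := List.tail_drop ..
    rw [← h3, hct]; rfl
  rw [hct, ht, find_cons_no_match c t sub (hct ▸ h)]
  split
  · simp
  · next hne =>
    have h4 := PySem.Chars.neg_one_le_find t sub
    have h5 : ¬ (1 + PySem.Chars.find t sub = -1) := by omega
    simp only [if_neg h5]
    push_cast; ring

-- a successful find lands at or after the start position, on a match.
theorem findFrom_found (line sub : List Char) (k : Nat) (hk : k ≤ line.length)
    (h : PySem.Chars.findFrom line sub (k : Int) ≠ -1) :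
    (k : Int) ≤ PySem.Chars.findFrom line sub (k : Int) ∧
      sub <+: line.drop (PySem.Chars.findFrom line sub (k : Int)).toNat :=
  ⟨(PySem.Chars.findFrom_natCast_spec line sub k hk h).1,
   (PySem.Chars.findFrom_natCast_spec line sub k hk h).2.1⟩

-- skipping a non-match position leaves B's same-symbol loop unchanged.
theorem bsame_step (line s : List Char) (ssym : String) (fb i : Nat) (stack : List String)
    (hk : i < line.length) (hm : ¬ s <+: line.drop i) :
    matchLoopBSame line s ssym fb i stack = matchLoopBSame line s ssym fb (i + 1) stack := by
  cases fb with
  | zero => rfl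
  | succ fb' =>
    simp only [matchLoopBSame]
    rw [findFrom_step line s i hk hm]

-- skipping a position matching neither symbol leaves B's distinct-symbol loop unchanged.
theorem bdiff_step (line s e : List Char) (ssym : String) (fb i : Nat) (stack : List String)
    (hk : i < line.length) (hms : ¬ s <+: line.drop i) (hme : ¬ e <+: line.drop i) :
    matchLoopBDiff line s e ssym fb i stack = matchLoopBDiff line s e ssym fb (i + 1) stack := by
  cases fb with
  | zero => rfl
  | succ fb' =>
    simp only [matchLoopBDiff]
    rw [findFrom_step line s i hk hms, findFrom_step line e i hk hme]

-- B's loops return the stack unchanged once the scan position reaches the end.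
theorem bsame_end (line s : List Char) (ssym : String) (fb : Nat) (stack : List String)
    (hs : s ≠ []) :
    matchLoopBSame line s ssym fb line.length stack = stack := by
  cases fb with
  | zero => rfl
  | succ fb' =>
    simp only [matchLoopBSame, findFrom_at_end line s hs]
    simp [hs]

theorem bdiff_end (line s e : List Char) (ssym : String) (fb : Nat) (stack : List String)
    (hs : s ≠ []) (he : e ≠ []) :
    matchLoopBDiff line s e ssym fb line.length stack = stack := by
  cases fb with
  | zero => rfl
  | succ fb' =>
    simp only [matchLoopBDiff, findFrom_at_end line s hs, findFrom_at_end line e he]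
    simp [hs, he]

-- B's loops on the empty line return the stack unchanged.
theorem bsame_nil (s : List Char) (ssym : String) (fb : Nat) (stack : List String) :
    matchLoopBSame [] s ssym fb 0 stack = stack := by
  cases fb with
  | zero => rfl
  | succ fb' =>
    by_cases hs : s = []
    · simp [matchLoopBSame, hs]
    · exact bsame_end [] s ssym (fb' + 1) stack hs

theorem bdiff_nil (s e : List Char) (ssym : String) (fb : Nat) (stack : List String) :
    matchLoopBDiff [] s e ssym fb 0 stack = stack := by
  cases fb with
  | zero => rfl
  | succ fb' =>
    by_cases hs : s = []
    · simp [matchLoopBDiff, hs]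
    · by_cases he : e = []
      · simp [matchLoopBDiff, he]
      · exact bdiff_end [] s e ssym (fb' + 1) stack hs he

-- same-symbol case: A's scan = B's jump scan.
theorem same_equiv (line s : List Char) (ssym : String) (hs : s ≠ []) :
    ∀ (fa fb i : Nat) (stack : List String), i ≤ line.length →
      line.length - i ≤ fa → line.length - i ≤ fb →
      matchLoopA line s s ssym fa i stack = matchLoopBSame line s ssym fb i stack := by
  intro fa
  induction fa with
  | zero =>
    intro fb i stack hi hfa hfb
    have hie : i = line.length := by omega
    subst hie
    simpa [matchLoopA] using (bsame_end line s ssym fb stack hs).symm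
  | succ fa' ih =>
    intro fb i stack hi hfa hfb
    by_cases hlt : i < line.length
    · have hs1 : 0 < s.length := List.length_pos_iff.mpr hs
      obtain ⟨fb', rfl⟩ : ∃ fb', fb = fb' + 1 := ⟨fb - 1, by omega⟩
      by_cases hm : s <+: line.drop i
      · have hcond := (condA_iff line s i hs).mpr hm
        have hp : PySem.Chars.findFrom line s (i : Int) = (i : Int) :=
          findFrom_at_match line s i hs hm
        simp only [matchLoopA, matchLoopBSame, if_pos hlt, if_pos hcond, hp]
        have hne : ¬ ((i : Int) = -1) := by omega
        simp only [if_neg hne, Int.toNat_natCast, if_neg (by simpa using hs)]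
        by_cases hst : stack = []
        · simp only [if_pos hst]
          exact ih fb' (i + s.length) (stack ++ [ssym]) hcond.1 (by omega) (by omega)
        · simp only [if_neg hst]
          exact ih fb' (i + s.length) stack.dropLast hcond.1 (by omega) (by omega)
      · have hncond : ¬ (i + s.length ≤ line.length ∧ (line.drop i).take s.length = s) := by
          rw [condA_iff line s i hs]; exact hm
        rw [bsame_step line s ssym (fb' + 1) i stack hlt hm]
        simp only [matchLoopA, if_pos hlt, if_neg hncond]
        exact ih (fb' + 1) (i + 1) stack (by omega) (by omega) (by omega)
    · have hie : i = line.length := by omega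
      subst hie
      simpa [matchLoopA] using (bsame_end line s ssym fb stack hs).symm

-- distinct-symbol case: A's scan = B's jump scan, under the no-underflow invariant.
theorem diff_equiv (line s e : List Char) (ssym : String) (hs : s ≠ []) (he : e ≠ [])
    (hne : s ≠ e) :
    ∀ (fa fb i : Nat) (stack : List String), i ≤ line.length →
      line.length - i ≤ fa → line.length - i ≤ fb →
      scanOk s e (line.drop i) stack.length = true →
      matchLoopA line s e ssym fa i stack = matchLoopBDiff line s e ssym fb i stack := by
  intro fa
  induction fa with
  | zero =>
    intro fb i stack hi hfa hfb hok
    have hie : i = line.length := by omega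
    subst hie
    simpa [matchLoopA] using (bdiff_end line s e ssym fb stack hs he).symm
  | succ fa' ih =>
    intro fb i stack hi hfa hfb hok
    by_cases hlt : i < line.length
    · have hs1 : 0 < s.length := List.length_pos_iff.mpr hs
      have he1 : 0 < e.length := List.length_pos_iff.mpr he
      obtain ⟨fb', rfl⟩ : ∃ fb', fb = fb' + 1 := ⟨fb - 1, by omega⟩
      obtain ⟨c, t, hct⟩ : ∃ c t, line.drop i = c :: t := by
        cases hd : line.drop i with
        | nil =>
          exfalso
          have h2 := List.length_drop (l := line) (i := i); rw [hd] at h2; simp at h2; omega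
        | cons c t => exact ⟨c, t, rfl⟩
      by_cases hm : s <+: line.drop i
      · -- start symbol matches at i: both push
        have hcond := (condA_iff line s i hs).mpr hm
        have hp : PySem.Chars.findFrom line s (i : Int) = (i : Int) :=
          findFrom_at_match line s i hs hm
        -- B takes the push branch
        have hbranch : PySem.Chars.findFrom line e (i : Int) = -1 ∨
            (PySem.Chars.findFrom line s (i : Int) ≠ -1 ∧
             PySem.Chars.findFrom line s (i : Int) ≤ PySem.Chars.findFrom line e (i : Int)) := by
          by_cases hpe : PySem.Chars.findFrom line e (i : Int) = -1
          · exact Or.inl hpe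
          · right
            refine ⟨by rw [hp]; omega, ?_⟩
            rw [hp]
            exact (findFrom_found line e i (by omega) hpe).1
        have hok' : scanOk s e (line.drop (i + s.length)) (stack ++ [ssym]).length = true := by
          have := hok
          rw [hct, scanOk] at this
          rw [dif_pos ⟨hs, hct ▸ hm⟩] at this
          have hdd : (c :: t).drop s.length = line.drop (i + s.length) := by
            rw [← hct, List.drop_drop]
          rw [hdd] at this
          simpa using this
        have hnfirst : ¬ (PySem.Chars.findFrom line s (i : Int) = -1 ∧
            PySem.Chars.findFrom line e (i : Int) = -1) := by
          rw [hp]; rintro ⟨h1, -⟩; omega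
        simp only [matchLoopA, matchLoopBDiff, if_pos hlt, if_neg hne, if_pos hcond,
          if_neg (by simp [hs, he] : ¬ (s = [] ∨ e = []))]
        rw [if_neg hnfirst, if_pos hbranch, hp]
        simp only [Int.toNat_natCast]
        exact ih fb' (i + s.length) (stack ++ [ssym]) hcond.1 (by omega) (by omega) hok'
      · by_cases hme : e <+: line.drop i
        · -- end symbol matches at i (start does not): both pop
          have hconde := (condA_iff line e i he).mpr hme
          have hnconds : ¬ (i + s.length ≤ line.length ∧ (line.drop i).take s.length = s) := by
            rw [condA_iff line s i hs]; exact hm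
          have hpe : PySem.Chars.findFrom line e (i : Int) = (i : Int) :=
            findFrom_at_match line e i he hme
          -- stack is nonempty by the invariant
          have hokc := hok
          rw [hct, scanOk, dif_neg (by rintro ⟨-, hpre⟩; exact hm (hct ▸ hpre)),
            dif_pos ⟨he, hct ▸ hme⟩] at hokc
          have hdepth : stack.length ≠ 0 := by
            by_contra h0
            rw [if_pos h0] at hokc
            simp at hokc
          rw [if_neg hdepth] at hokc
          have hstack : stack ≠ [] := by
            intro h0; exact hdepth (by rw [h0]; rfl)
          have hok' : scanOk s e (line.drop (i + e.length)) stack.dropLast.length = true := by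
            have hdd : (c :: t).drop e.length = line.drop (i + e.length) := by
              rw [← hct, List.drop_drop]
            rw [hdd] at hokc
            have hlen : stack.dropLast.length = stack.length - 1 := List.length_dropLast
            rw [hlen]
            exact hokc
          -- B takes the pop branch
          have hnfirst : ¬ (PySem.Chars.findFrom line s (i : Int) = -1 ∧
              PySem.Chars.findFrom line e (i : Int) = -1) := by
            rw [hpe]; rintro ⟨-, h2⟩; omega
          have hnbranch : ¬ (PySem.Chars.findFrom line e (i : Int) = -1 ∨
              (PySem.Chars.findFrom line s (i : Int) ≠ -1 ∧
               PySem.Chars.findFrom line s (i : Int) ≤ PySem.Chars.findFrom line e (i : Int))) := by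
            rw [hpe]
            rintro (h1 | ⟨h2, h3⟩)
            · omega
            · obtain ⟨hge, hpre⟩ := findFrom_found line s i (by omega) h2
              have hgt : (i : Int) < PySem.Chars.findFrom line s (i : Int) := by
                rcases lt_or_eq_of_le hge with h | h
                · exact h
                · exfalso
                  rw [← h] at hpre
                  simp only [Int.toNat_natCast] at hpre
                  exact hm hpre
              omega
          simp only [matchLoopA, matchLoopBDiff, if_pos hlt, if_neg hne, if_neg hnconds,
            if_pos hconde, if_neg (by simp [hs, he] : ¬ (s = [] ∨ e = [])), if_neg hstack]
          rw [if_neg hnfirst, if_neg hnbranch, hpe]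
          simp only [Int.toNat_natCast]
          exact ih fb' (i + e.length) stack.dropLast hconde.1 (by omega) (by omega) hok'
        · -- neither symbol matches at i: both step over
          have hnconds : ¬ (i + s.length ≤ line.length ∧ (line.drop i).take s.length = s) := by
            rw [condA_iff line s i hs]; exact hm
          have hnconde : ¬ (i + e.length ≤ line.length ∧ (line.drop i).take e.length = e) := by
            rw [condA_iff line e i he]; exact hme
          have hok' : scanOk s e (line.drop (i + 1)) stack.length = true := by
            have hokc := hok
            rw [hct, scanOk, dif_neg (by rintro ⟨-, hpre⟩; exact hm (hct ▸ hpre)),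
              dif_neg (by rintro ⟨-, hpre⟩; exact hme (hct ▸ hpre))] at hokc
            have ht : line.drop (i + 1) = t := by
              have h3 : (line.drop i).tail = line.drop (i + 1) := List.tail_drop ..
              rw [← h3, hct]; rfl
            rw [ht]
            exact hokc
          rw [bdiff_step line s e ssym (fb' + 1) i stack hlt hm hme]
          simp only [matchLoopA, if_pos hlt, if_neg hne, if_neg hnconds, if_neg hnconde]
          exact ih (fb' + 1) (i + 1) stack (by omega) (by omega) (by omega) hok'
    · have hie : i = line.length := by omega
      subst hie
      simpa [matchLoopA] using (bdiff_end line s e ssym fb stack hs he).symm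

-- ===== VERDICT (by name: the statement is the Claim_ definition above) =====
theorem match_line_spec : Claim_equal_match_line := by
  intro line s_sym e_sym stack _ hpre
  unfold Spec_match_line match_line match_line_alt
  rcases hpre with hline | ⟨hs, he, hcase⟩
  · subst hline
    have hnil : ("" : String).toList = [] := rfl
    simp only [hnil, List.length_nil]
    by_cases hse : s_sym = e_sym
    · rw [if_pos hse, bsame_nil]
      simp [matchLoopA]
    · rw [if_neg hse, bdiff_nil]
      simp [matchLoopA]
  · have hsl : s_sym.toList ≠ [] := by
      intro h0; exact hs (String.toList_inj.mp (by simpa using h0))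
    have hel : e_sym.toList ≠ [] := by
      intro h0; exact he (String.toList_inj.mp (by simpa using h0))
    rcases hcase with hse | hok
    · subst hse
      rw [if_pos rfl]
      exact same_equiv line.toList s_sym.toList s_sym hsl (line.toList.length + 1)
        (line.toList.length + 1) 0 stack (by omega) (by omega) (by omega)
    · by_cases hse : s_sym = e_sym
      · subst hse
        rw [if_pos rfl]
        exact same_equiv line.toList s_sym.toList s_sym hsl (line.toList.length + 1)
          (line.toList.length + 1) 0 stack (by omega) (by omega) (by omega)
      · have hnel : s_sym.toList ≠ e_sym.toList := by
          intro h0; exact hse (String.toList_inj.mp h0)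
        rw [if_neg hse]
        refine diff_equiv line.toList s_sym.toList e_sym.toList s_sym hsl hel hnel
          (line.toList.length + 1) (line.toList.length + 1) 0 stack (by omega) (by omega)
          (by omega) ?_
        simpa using hok
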